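-- pv_equiv track=rewrite | github.com/common-workflow-language/cwl-utils | cwl_utils/sandboxjs.py | linenum
-- ===== SOURCE A (Python) =====
-- def linenum(fn: str) -> str:
--     lines = fn.splitlines()
--     ofs = 0
--     maxlines = 99
--     if len(lines) > maxlines:
--         ofs = len(lines) - maxlines
--         lines = lines[-maxlines:]
--     return "\n".join("%02i %s" % (i + ofs + 1, b) for i, b in enumerate(lines))
-- ===== SOURCE B (Python) =====
-- def linenum(fn: str) -> str:
--     lines = fn.splitlines()
--
--     def go(n, taken):
--         # collect up to 99 numbered lines ending at lines[n-1], walking back to front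
--         if n == 0 or taken == 99:
--             return []
--         return go(n - 1, taken + 1) + ["%02i %s" % (n, lines[n - 1])]
--
--     return "\n".join(go(len(lines), 0))
-- ===== Notes on version B (the rewrite author's own statement) =====
-- stated objective: alternative
-- what changed: Replaces the slice/enumerate/offset pipeline with a recursion that walks the lines back-to-front carrying an absolute line counter and a taken-counter capped at 99, so there is no length check, no slicing and no enumerate.
import Mathlib
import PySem

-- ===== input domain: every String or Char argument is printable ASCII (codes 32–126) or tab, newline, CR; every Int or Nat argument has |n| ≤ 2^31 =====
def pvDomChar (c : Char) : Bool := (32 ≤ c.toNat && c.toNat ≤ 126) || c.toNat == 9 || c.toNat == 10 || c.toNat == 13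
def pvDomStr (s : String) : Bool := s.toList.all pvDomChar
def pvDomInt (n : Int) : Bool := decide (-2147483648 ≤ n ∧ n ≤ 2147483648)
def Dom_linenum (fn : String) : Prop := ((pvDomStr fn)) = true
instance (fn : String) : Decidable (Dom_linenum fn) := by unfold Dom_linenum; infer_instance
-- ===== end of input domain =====

-- B replaces A's slice/enumerate/offset pipeline by a back-to-front recursion over the
-- lines carrying an absolute line counter and a taken-counter capped at 99 (objective:
-- alternative decomposition; same cost).

-- shared helper: "%02i %s" % (n, b)  (exact for n ≥ 0, the only values reached here)
def fmt02 (n : Int) (b : String) : String :=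
  let s := PySem.Int.toStr n
  (if s.toList.length < 2 then "0" ++ s else s) ++ " " ++ b

-- ===== PORT A =====
def linenum (fn : String) : String :=
  let lines := PySem.Str.splitlines fn
  let ofs : Int := 0
  let maxlines : Int := 99
  let p := if (lines.length : Int) > maxlines
    then ((lines.length : Int) - maxlines, PySem.List.slice lines (some (-maxlines)) none)
    else (ofs, lines)
  PySem.Str.join "\n"
    ((PySem.List.enumerate p.2 0).map (fun q => fmt02 (q.1 + p.1 + 1) q.2))

-- ===== PORT B =====
-- go n taken: 'lines[n - 1]' is always in range here (n ≤ lines.length at every call),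
-- so the .getD "" after the exact Python indexing primitive is never taken.
def goB (lines : List String) : Nat → Nat → List String
  | 0, _ => []
  | n + 1, taken =>
    if taken == 99 then []
    else goB lines n (taken + 1)
      ++ [fmt02 ((n : Int) + 1) ((PySem.List.pyGet? lines (n : Int)).getD "")]

def linenum_alt (fn : String) : String :=
  let lines := PySem.Str.splitlines fn
  PySem.Str.join "\n" (goB lines lines.length 0)

-- ===== PRECONDITION & SPEC =====
def Spec_linenum (fn : String) (out : String) : Prop := out = linenum_alt fn
instance (fn : String) (out : String) : Decidable (Spec_linenum fn out) := by unfold Spec_linenum; infer_instance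

-- ===== CLAIM (what is proved, stated in full; the proofs are below) =====
def Claim_equal_linenum : Prop := ∀ (fn : String), Dom_linenum fn → Spec_linenum fn (linenum fn)

-- ===== LEMMAS AND PROOFS =====

theorem enum_shift {α β : Type} (xs : List α) (s : Int) (f : Int → α → β) :
    (PySem.List.enumerate xs s).map (fun q => f q.1 q.2)
      = (PySem.List.enumerate xs 0).map (fun q => f (q.1 + s) q.2) := by
  induction xs generalizing s f with
  | nil => simp [PySem.List.enumerate_nil]
  | cons x xs ih =>
      simp only [PySem.List.enumerate_cons, List.map_cons, Int.zero_add]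
      refine congrArg₂ _ rfl ?_
      rw [ih (s + 1) f, ih 1 (fun i a => f (i + s) a)]
      refine List.map_congr_left (fun q _ => ?_)
      have h3 : q.1 + (s + 1) = q.1 + 1 + s := by ring
      simp only [h3]

theorem enum_drop {α : Type} (xs : List α) (k : Nat) :
    (PySem.List.enumerate xs 0).drop k = PySem.List.enumerate (xs.drop k) (k : Int) := by
  rcases Nat.lt_or_ge xs.length k with h | h
  · simp [List.drop_of_length_le (Nat.le_of_lt h), PySem.List.enumerate_nil,
      List.drop_of_length_le, PySem.List.length_enumerate, Nat.le_of_lt h]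
  · have h1 : (PySem.List.enumerate (xs.take k) (0 : Int)).length = k := by
      simp [PySem.List.length_enumerate, Nat.min_eq_left h]
    have h2 : (xs.take k).length = k := by simp [Nat.min_eq_left h]
    conv_lhs => rw [← List.take_append_drop k xs]
    rw [PySem.List.enumerate_append, h2,
        List.drop_append_of_le_length (by simp [h1]),
        List.drop_of_length_le (by simp [h1])]
    simp

-- characterisation of B's recursion: it produces exactly the last min(n, 99-taken)
-- formatted lines of lines.take n
theorem goB_eq (lines : List String) (n : Nat) (taken : Nat)
    (hn : n ≤ lines.length) (ht : taken ≤ 99) :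
    goB lines n taken
      = ((PySem.List.enumerate (lines.take n) 0).map
          (fun q => fmt02 (q.1 + 1) q.2)).drop (n - (99 - taken)) := by
  induction n generalizing taken with
  | zero => simp [goB, PySem.List.enumerate_nil]
  | succ n ih =>
      have hlen : ((PySem.List.enumerate (lines.take n) 0).map
          (fun q => fmt02 (q.1 + 1) q.2)).length = n := by
        simp [PySem.List.length_enumerate, Nat.min_eq_left (Nat.le_of_succ_le hn)]
      by_cases h99 : taken = 99
      · subst h99
        have hl : ((PySem.List.enumerate (lines.take (n+1)) 0).map
            (fun q => fmt02 (q.1 + 1) q.2)).length = n + 1 := by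
          simp [PySem.List.length_enumerate, Nat.min_eq_left hn]
        rw [List.drop_of_length_le (by omega)]
        simp [goB]
      · have hlt : taken < 99 := lt_of_le_of_ne ht h99
        have hx : n < lines.length := hn
        have htake : lines.take (n + 1) = lines.take n ++ [lines[n]] := by
          rw [List.take_add_one]; simp [List.getElem?_eq_getElem hx]
        have hget : (PySem.List.pyGet? lines (n : Int)).getD "" = lines[n] := by
          simp [PySem.List.pyGet?, PySem.List.pyIdx?, hx]
        have hlen' : (lines.take n).length = n := by
          simp [Nat.min_eq_left (Nat.le_of_succ_le hn)]
        have hsub : n + 1 - (99 - taken) = n - (99 - (taken + 1)) := by omega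
        rw [goB, if_neg (by simpa using h99),
            ih (taken + 1) (Nat.le_of_succ_le hn) (by omega),
            htake, PySem.List.enumerate_append, hlen', List.map_append, hsub,
            List.drop_append_of_le_length (by rw [hlen]; omega)]
        simp [PySem.List.enumerate_cons, PySem.List.enumerate_nil,
          List.getElem?_eq_getElem hx]

-- ===== VERDICT (by name: the statement is the Claim_ definition above) =====
theorem linenum_spec : Claim_equal_linenum := by
  intro fn _
  unfold Spec_linenum linenum linenum_alt
  simp only []
  set ls := PySem.Str.splitlines fn with hls
  rw [goB_eq ls ls.length 0 le_rfl (by omega), List.take_length]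
  by_cases h : (ls.length : Int) > 99
  · simp only [if_pos h]
    rw [PySem.List.slice_from_neg_ofNat _ 99 (by omega)]
    refine congrArg _ ?_
    rw [← List.map_drop, enum_drop,
        enum_shift (ls.drop (ls.length - 99)) ((ls.length - 99 : Nat) : Int)
          (fun i b => fmt02 (i + 1) b)]
    refine List.map_congr_left (fun q _ => ?_)
    have h2 : ((ls.length - 99 : Nat) : Int) = (ls.length : Int) - 99 := by omega
    rw [h2]
  · simp only [if_neg h]
    have h0 : ls.length - 99 = 0 := by omega
    rw [h0, List.drop_zero]
    refine congrArg _ (List.map_congr_left (fun q _ => ?_))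
    simp
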